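-- pv_equiv track=rewrite | github.com/ste-coding/fpc1 | bolo_de_rolo.py | max_fatia_tamanho
-- ===== SOURCE A (Python) =====
-- def fatias_possiveis(tamanho_fatia, tamanhos_bolos, K):
--     total_fatias = 0
--     for i in range(K):
--         total_fatias += tamanhos_bolos[i] // tamanho_fatia
--     return total_fatias
--
-- def max_fatia_tamanho(N, K, tamanhos_bolos):
--     maior_bolo = tamanhos_bolos[0]
--     for i in range(1, K):
--         if tamanhos_bolos[i] > maior_bolo:
--             maior_bolo = tamanhos_bolos[i]
--
--     inicio, fim = 1, maior_bolo
--     melhor_tamanho = 0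
--
--     while inicio <= fim:
--         meio = (inicio + fim) // 2
--
--         if fatias_possiveis(meio, tamanhos_bolos, K) >= N:
--             melhor_tamanho = meio
--             inicio = meio + 1
--         else:
--             fim = meio - 1
--
--     return melhor_tamanho
-- ===== SOURCE B (Python) =====
-- def max_fatia_tamanho(N, K, tamanhos_bolos):
--     maior_bolo = tamanhos_bolos[0]
--     for i in range(1, K):
--         if tamanhos_bolos[i] > maior_bolo:
--             maior_bolo = tamanhos_bolos[i]
--
--     bit = 1
--     while bit * 2 <= maior_bolo:
--         bit *= 2
--
--     tamanho = 0
--     while bit >= 1: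
--         cand = tamanho + bit
--         if cand <= maior_bolo and sum(tamanhos_bolos[i] // cand for i in range(K)) >= N:
--             tamanho = cand
--         bit //= 2
--     return tamanho
-- ===== Notes on version B (the rewrite author's own statement) =====
-- stated objective: alternative
-- what changed: Replaced the lo/hi binary search with a best-so-far accumulator by binary lifting: grow a power of two past the largest cake, then add bits greedily from high to low; same O(K log maior) cost.
-- outside the precondition, e.g. on max_fatia_tamanho(-3, 2, [-6, 2]): A returns 0, B returns 2
import Mathlib
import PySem

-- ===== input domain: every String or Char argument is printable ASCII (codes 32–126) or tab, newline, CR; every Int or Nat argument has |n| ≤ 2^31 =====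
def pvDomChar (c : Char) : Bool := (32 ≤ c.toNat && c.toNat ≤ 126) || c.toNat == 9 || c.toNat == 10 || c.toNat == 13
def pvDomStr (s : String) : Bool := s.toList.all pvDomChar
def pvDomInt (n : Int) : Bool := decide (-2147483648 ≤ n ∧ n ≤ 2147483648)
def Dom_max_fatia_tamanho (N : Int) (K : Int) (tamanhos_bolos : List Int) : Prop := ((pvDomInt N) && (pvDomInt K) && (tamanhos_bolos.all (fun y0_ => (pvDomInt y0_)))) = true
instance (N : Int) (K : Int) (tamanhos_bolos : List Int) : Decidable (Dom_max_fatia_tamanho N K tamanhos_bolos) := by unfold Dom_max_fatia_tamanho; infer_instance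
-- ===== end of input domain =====

-- B replaces A's lo/hi binary search (with a best-so-far accumulator) by binary lifting:
-- grow a power of two past the largest cake, then add bits greedily; same O(K·log maior) cost ("alternative").

-- ===== PORT A =====
def fatias_possiveis (tamanho_fatia : Int) (tamanhos_bolos : List Int) (K : Int) : Int :=
  (PySem.List.pyRange 0 K 1).foldl
    (fun acc i => acc + PySem.Int.floordiv (PySem.List.pyGetD tamanhos_bolos i 0) tamanho_fatia) 0

def maiorBoloA (tamanhos_bolos : List Int) (K : Int) : Int :=
  (PySem.List.pyRange 1 K 1).foldl
    (fun m i => if PySem.List.pyGetD tamanhos_bolos i 0 > m then PySem.List.pyGetD tamanhos_bolos i 0 else m)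
    (PySem.List.pyGetD tamanhos_bolos 0 0)

-- the while loop; the Nat fuel argument only makes the recursion structural (it is always sufficient)
def buscaA (N : Int) (K : Int) (tamanhos_bolos : List Int) : Nat → Int → Int → Int → Int
  | 0, _, _, melhor => melhor
  | fuel + 1, inicio, fim, melhor =>
    if inicio ≤ fim then
      if fatias_possiveis (PySem.Int.floordiv (inicio + fim) 2) tamanhos_bolos K ≥ N then
        buscaA N K tamanhos_bolos fuel (PySem.Int.floordiv (inicio + fim) 2 + 1) fim
          (PySem.Int.floordiv (inicio + fim) 2)
      else
        buscaA N K tamanhos_bolos fuel inicio (PySem.Int.floordiv (inicio + fim) 2 - 1) melhor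
    else melhor

def max_fatia_tamanho (N : Int) (K : Int) (tamanhos_bolos : List Int) : Int :=
  buscaA N K tamanhos_bolos ((maiorBoloA tamanhos_bolos K).toNat + 1) 1 (maiorBoloA tamanhos_bolos K) 0

-- ===== PORT B =====
def maiorBoloB (tamanhos_bolos : List Int) (K : Int) : Int :=
  (PySem.List.pyRange 1 K 1).foldl
    (fun m i => if PySem.List.pyGetD tamanhos_bolos i 0 > m then PySem.List.pyGetD tamanhos_bolos i 0 else m)
    (PySem.List.pyGetD tamanhos_bolos 0 0)

-- sum(tamanhos_bolos[i] // cand for i in range(K))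
def somaFatiasB (tamanhos_bolos : List Int) (K cand : Int) : Int :=
  ((PySem.List.pyRange 0 K 1).map
    (fun i => PySem.Int.floordiv (PySem.List.pyGetD tamanhos_bolos i 0) cand)).sum

-- while bit * 2 <= maior_bolo: bit *= 2   (the Nat fuel only makes the recursion structural)
def sobeBitB (maior : Int) : Nat → Int → Int
  | 0, bit => bit
  | fuel + 1, bit => if bit * 2 ≤ maior then sobeBitB maior fuel (bit * 2) else bit

-- while bit >= 1: cand = tamanho + bit; if cand <= maior and soma >= N: tamanho = cand; bit //= 2
-- (again with a Nat fuel making the recursion structural)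
def desceBitB (N K : Int) (tamanhos_bolos : List Int) (maior : Int) : Nat → Int → Int → Int
  | 0, tamanho, _ => tamanho
  | fuel + 1, tamanho, bit =>
    if 1 ≤ bit then
      desceBitB N K tamanhos_bolos maior fuel
        (if tamanho + bit ≤ maior ∧ somaFatiasB tamanhos_bolos K (tamanho + bit) ≥ N then tamanho + bit else tamanho)
        (PySem.Int.floordiv bit 2)
    else tamanho

def max_fatia_tamanho_alt (N : Int) (K : Int) (tamanhos_bolos : List Int) : Int :=
  desceBitB N K tamanhos_bolos (maiorBoloB tamanhos_bolos K)
    ((sobeBitB (maiorBoloB tamanhos_bolos K) ((maiorBoloB tamanhos_bolos K).toNat + 1) 1).toNat + 1)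
    0 (sobeBitB (maiorBoloB tamanhos_bolos K) ((maiorBoloB tamanhos_bolos K).toNat + 1) 1)

-- ===== PRECONDITION & SPEC =====
-- Pre_ excludes inputs on which A raises (empty list: IndexError on tamanhos_bolos[0]; K > len: IndexError),
-- and restricts the cake sizes counted (the first K entries) to the problem's natural domain of nonnegative
-- lengths: on negative sizes floor division makes the slice count non-monotone and A's binary search
-- returns an accidental value.
def Pre_max_fatia_tamanho (N : Int) (K : Int) (tamanhos_bolos : List Int) : Prop :=
  tamanhos_bolos ≠ [] ∧ K ≤ (tamanhos_bolos.length : Int) ∧ ∀ x ∈ tamanhos_bolos.take K.toNat, 0 ≤ x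

instance (N : Int) (K : Int) (tamanhos_bolos : List Int) : Decidable (Pre_max_fatia_tamanho N K tamanhos_bolos) := by
  unfold Pre_max_fatia_tamanho; infer_instance

def pvWitness_max_fatia_tamanho : Int × Int × List Int := (3, 2, [4, 6])

def Spec_max_fatia_tamanho (N : Int) (K : Int) (tamanhos_bolos : List Int) (out : Int) : Prop := out = max_fatia_tamanho_alt N K tamanhos_bolos
instance (N : Int) (K : Int) (tamanhos_bolos : List Int) (out : Int) : Decidable (Spec_max_fatia_tamanho N K tamanhos_bolos out) := by unfold Spec_max_fatia_tamanho; infer_instance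

-- ===== CLAIM (what is proved, stated in full; the proofs are below) =====
def Claim_equal_max_fatia_tamanho : Prop := ∀ (N : Int) (K : Int) (tamanhos_bolos : List Int), Dom_max_fatia_tamanho N K tamanhos_bolos → Pre_max_fatia_tamanho N K tamanhos_bolos → Spec_max_fatia_tamanho N K tamanhos_bolos (max_fatia_tamanho N K tamanhos_bolos)

-- ===== LEMMAS AND PROOFS =====

-- the answer both searches compute: the number of feasible sizes in [1, maior] (feasibility is
-- downward closed under the precondition, so this count IS the largest feasible size, or 0)
def tFeas (N K : Int) (xs : List Int) (maior : Int) : Int :=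
  (((List.range maior.toNat).countP
    (fun k : Nat => decide (N ≤ fatias_possiveis ((k : Int) + 1) xs K))) : Nat)

theorem tFeas_nonneg (N K : Int) (xs : List Int) (maior : Int) : 0 ≤ tFeas N K xs maior := by
  unfold tFeas; omega

theorem tFeas_le (N K : Int) (xs : List Int) (maior : Int) (h : 0 ≤ maior) :
    tFeas N K xs maior ≤ maior := by
  unfold tFeas
  have h1 := List.countP_le_length (l := List.range maior.toNat)
    (p := fun k : Nat => decide (N ≤ fatias_possiveis ((k : Int) + 1) xs K))
  rw [List.length_range] at h1
  omega

theorem tFeas_of_neg (N K : Int) (xs : List Int) (maior : Int) (h : maior < 0) :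
    tFeas N K xs maior = 0 := by
  have h0 : maior.toNat = 0 := by omega
  unfold tFeas; rw [h0]; rfl

theorem tFeas_lt_of_gt (N K : Int) (xs : List Int) (maior c : Int) (h1 : 1 ≤ c)
    (h2 : maior < c) : tFeas N K xs maior < c := by
  rcases (show maior < 0 ∨ 0 ≤ maior by omega) with h | h
  · rw [tFeas_of_neg N K xs maior h]; omega
  · have := tFeas_le N K xs maior h; omega

theorem soma_eq_fatias (xs : List Int) (K cand : Int) :
    somaFatiasB xs K cand = fatias_possiveis cand xs K := by
  unfold somaFatiasB fatias_possiveis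
  rw [PySem.List.foldl_add]
  simp

theorem pyGetD_mem_take (xs : List Int) (K i : Int) (hK : K ≤ (xs.length : Int))
    (h0 : 0 ≤ i) (h1 : i < K) : PySem.List.pyGetD xs i 0 ∈ xs.take K.toNat := by
  have hlen : i < (xs.length : Int) := lt_of_lt_of_le h1 hK
  rw [PySem.List.pyGetD_eq_getElem xs 0 h0 hlen]
  have hlt : i.toNat < (xs.take K.toNat).length := by
    rw [List.length_take]; omega
  have he : (xs.take K.toNat)[i.toNat]'hlt = xs[i.toNat]'(by omega) := List.getElem_take
  rw [← he]
  exact List.getElem_mem hlt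

theorem fatias_antitone (N K : Int) (xs : List Int)
    (hK : K ≤ (xs.length : Int)) (hpos : ∀ x ∈ xs.take K.toNat, 0 ≤ x)
    (a b : Int) (ha : 1 ≤ a) (hab : a ≤ b) :
    fatias_possiveis b xs K ≤ fatias_possiveis a xs K := by
  unfold fatias_possiveis
  rw [PySem.List.foldl_add, PySem.List.foldl_add]
  simp only [zero_add]
  apply List.sum_le_sum
  intro i hi
  rw [PySem.List.mem_pyRange_one] at hi
  have hx : (0:Int) ≤ PySem.List.pyGetD xs i 0 :=
    hpos _ (pyGetD_mem_take xs K i hK hi.1 hi.2)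
  have h1 : PySem.Int.floordiv (PySem.List.pyGetD xs i 0) b * b ≤ PySem.List.pyGetD xs i 0 :=
    (PySem.Int.le_floordiv_iff_mul_le (by omega)).mp le_rfl
  have h2 : (0:Int) ≤ PySem.Int.floordiv (PySem.List.pyGetD xs i 0) b :=
    (PySem.Int.le_floordiv_iff_mul_le (by omega)).mpr (by simpa using hx)
  refine (PySem.Int.le_floordiv_iff_mul_le (by omega : (0:Int) < a)).mpr ?_
  nlinarith

theorem feas_up (N K : Int) (xs : List Int) (maior : Int)
    (hK : K ≤ (xs.length : Int)) (hpos : ∀ x ∈ xs.take K.toNat, 0 ≤ x)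
    (m : Int) (h1 : 1 ≤ m) (h2 : m ≤ maior) (hf : N ≤ fatias_possiveis m xs K) :
    m ≤ tFeas N K xs maior := by
  unfold tFeas
  have hsub : (List.range m.toNat).Sublist (List.range maior.toNat) :=
    List.range_sublist.mpr (by omega)
  have hall : ∀ k ∈ List.range m.toNat,
      (fun k : Nat => decide (N ≤ fatias_possiveis ((k : Int) + 1) xs K)) k = true := by
    intro k hk
    rw [List.mem_range] at hk
    exact decide_eq_true
      (le_trans hf (fatias_antitone N K xs hK hpos _ _ (by omega) (by omega)))
  have hlen : (List.range m.toNat).countP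
      (fun k : Nat => decide (N ≤ fatias_possiveis ((k : Int) + 1) xs K)) = m.toNat := by
    rw [List.countP_eq_length.mpr hall, List.length_range]
  have h2' := hsub.countP_le
    (p := fun k : Nat => decide (N ≤ fatias_possiveis ((k : Int) + 1) xs K))
  omega

theorem feas_down (N K : Int) (xs : List Int) (maior : Int)
    (hK : K ≤ (xs.length : Int)) (hpos : ∀ x ∈ xs.take K.toNat, 0 ≤ x)
    (m : Int) (h1 : 1 ≤ m) (hf : ¬ N ≤ fatias_possiveis m xs K) :
    tFeas N K xs maior < m := by
  unfold tFeas
  have key : ∀ M : Nat, (List.range M).countP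
      (fun k : Nat => decide (N ≤ fatias_possiveis ((k : Int) + 1) xs K)) ≤ (m - 1).toNat := by
    intro M
    by_cases hM : M ≤ (m - 1).toNat
    · have := List.countP_le_length (l := List.range M)
        (p := fun k : Nat => decide (N ≤ fatias_possiveis ((k : Int) + 1) xs K))
      rw [List.length_range] at this
      omega
    · push_neg at hM
      have hsplit : M = (m - 1).toNat + (M - (m - 1).toNat) := by omega
      rw [hsplit, List.range_add, List.countP_append]
      have hz : (List.countP
          (fun k : Nat => decide (N ≤ fatias_possiveis ((k : Int) + 1) xs K))
          ((List.range (M - (m - 1).toNat)).map (fun x => (m - 1).toNat + x))) = 0 := by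
        rw [List.countP_eq_zero]
        intro k hk
        rw [List.mem_map] at hk
        obtain ⟨j, _, rfl⟩ := hk
        simp only [decide_eq_true_eq]
        intro hcon
        have hma : m ≤ ((((m - 1).toNat + j : Nat)) : Int) + 1 := by push_cast; omega
        have := fatias_antitone N K xs hK hpos m _ h1 hma
        omega
      have hle := List.countP_le_length (l := List.range (m - 1).toNat)
        (p := fun k : Nat => decide (N ≤ fatias_possiveis ((k : Int) + 1) xs K))
      rw [List.length_range] at hle
      omega
  have := key maior.toNat
  omega

theorem buscaA_eq (N K : Int) (xs : List Int) (maior : Int)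
    (hK : K ≤ (xs.length : Int)) (hpos : ∀ x ∈ xs.take K.toNat, 0 ≤ x) :
    ∀ (fuel : Nat) (inicio fim melhor : Int), (fim + 1 - inicio).toNat < fuel →
      1 ≤ inicio → fim ≤ maior → tFeas N K xs maior ≤ fim → 0 ≤ melhor →
      melhor ≤ tFeas N K xs maior → (tFeas N K xs maior < inicio → tFeas N K xs maior = melhor) →
      buscaA N K xs fuel inicio fim melhor = tFeas N K xs maior := by
  intro fuel
  induction fuel with
  | zero => intro inicio fim melhor hfu; exact absurd hfu (by omega)
  | succ fuel ih =>
    intro inicio fim melhor hfu hi hfm ht hm0 hmt hlt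
    simp only [buscaA]
    split_ifs with h1 h2
    · have hb := PySem.Int.floordiv_two_mid_bounds h1
      have hmt' : PySem.Int.floordiv (inicio + fim) 2 ≤ tFeas N K xs maior :=
        feas_up N K xs maior hK hpos _ (by omega) (by omega) h2
      exact ih _ _ _ (by omega) (by omega) hfm ht (by omega) hmt' (by omega)
    · have hb := PySem.Int.floordiv_two_mid_bounds h1
      have hdn : tFeas N K xs maior < PySem.Int.floordiv (inicio + fim) 2 :=
        feas_down N K xs maior hK hpos _ (by omega) h2
      exact ih _ _ _ (by omega) hi (by omega) (by omega) hm0 hmt hlt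
    · have := hlt (by omega)
      omega

theorem sobeBit_spec (maior : Int) :
    ∀ (fuel : Nat) (bit : Int), (maior - bit).toNat < fuel → 1 ≤ bit →
    bit ≤ sobeBitB maior fuel bit ∧ ¬ (sobeBitB maior fuel bit * 2 ≤ maior) ∧
    (∀ k : Nat, bit = 2 ^ k → ∃ j : Nat, sobeBitB maior fuel bit = 2 ^ j) := by
  intro fuel
  induction fuel with
  | zero => intro bit hfu; exact absurd hfu (by omega)
  | succ fuel ih =>
    intro bit hfu hb1
    simp only [sobeBitB]
    split_ifs with h
    · obtain ⟨ha, hb, hc⟩ := ih (bit * 2) (by omega) (by omega)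
      refine ⟨by omega, hb, ?_⟩
      intro k hk
      exact hc (k + 1) (by rw [hk]; ring)
    · exact ⟨le_refl _, by omega, fun k hk => ⟨k, hk⟩⟩

theorem desceBit_aux (N K : Int) (xs : List Int) (maior : Int)
    (hK : K ≤ (xs.length : Int)) (hpos : ∀ x ∈ xs.take K.toNat, 0 ≤ x) :
    ∀ (fuel : Nat) (bit tamanho : Int), bit.toNat < fuel →
      (bit = 0 ∨ ∃ k : Nat, bit = 2 ^ k) → 0 ≤ tamanho → tamanho ≤ tFeas N K xs maior →
      (1 ≤ bit → tFeas N K xs maior < tamanho + 2 * bit) →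
      (bit < 1 → tFeas N K xs maior = tamanho) →
      desceBitB N K xs maior fuel tamanho bit = tFeas N K xs maior := by
  intro fuel
  induction fuel with
  | zero => intro bit tamanho hfu; exact absurd hfu (by omega)
  | succ fuel ih =>
    intro bit tamanho hfu hb h0 hle hub hz
    simp only [desceBitB]
    split_ifs with h1 hc
    · -- bit ≥ 1, candidate taken
      obtain ⟨k, hk⟩ : ∃ k : Nat, bit = 2 ^ k := by
        rcases hb with h | h
        · omega
        · exact h
      clear hb hz
      have hup := hub h1
      clear hub
      have hcle : tamanho + bit ≤ tFeas N K xs maior := by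
        rw [soma_eq_fatias] at hc
        exact feas_up N K xs maior hK hpos _ (by omega) hc.1 hc.2
      have hbit' : PySem.Int.floordiv bit 2 = bit / 2 :=
        PySem.Int.floordiv_eq_ediv_of_pos (by omega)
      rcases Nat.eq_zero_or_pos k with hk0 | hkpos
      · have hb1 : bit = 1 := by rw [hk, hk0]; norm_num
        have hnext : PySem.Int.floordiv bit 2 = 0 := by rw [hbit', hb1]; decide
        rw [hnext]
        exact ih 0 (tamanho + bit) (by omega) (Or.inl rfl) (by omega) hcle
          (by omega) (by omega)
      · obtain ⟨j, rfl⟩ : ∃ j : Nat, k = j + 1 := ⟨k - 1, by omega⟩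
        have hp : (0:Int) < 2 ^ j := pow_pos (by norm_num) _
        have hke : bit = 2 * 2 ^ j := by rw [hk, pow_succ]; ring
        have hnext : PySem.Int.floordiv bit 2 = 2 ^ j := by
          rw [hbit', hke]; omega
        rw [hnext]
        exact ih (2 ^ j) (tamanho + bit) (by omega)
          (Or.inr ⟨j, rfl⟩) (by omega) hcle (by omega) (by omega)
    · -- bit ≥ 1, candidate rejected: the answer is below tamanho + bit
      obtain ⟨k, hk⟩ : ∃ k : Nat, bit = 2 ^ k := by
        rcases hb with h | h
        · omega
        · exact h
      clear hb hz
      have hup := hub h1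
      clear hub
      have hclt : tFeas N K xs maior < tamanho + bit := by
        rw [Classical.not_and_iff_not_or_not] at hc
        rcases hc with hc | hc
        · exact tFeas_lt_of_gt N K xs maior _ (by omega) (by omega)
        · rw [soma_eq_fatias] at hc
          exact feas_down N K xs maior hK hpos _ (by omega) (by omega)
      have hbit' : PySem.Int.floordiv bit 2 = bit / 2 :=
        PySem.Int.floordiv_eq_ediv_of_pos (by omega)
      rcases Nat.eq_zero_or_pos k with hk0 | hkpos
      · have hb1 : bit = 1 := by rw [hk, hk0]; norm_num
        have hnext : PySem.Int.floordiv bit 2 = 0 := by rw [hbit', hb1]; decide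
        rw [hnext]
        exact ih 0 tamanho (by omega) (Or.inl rfl) h0 hle (by omega) (by omega)
      · obtain ⟨j, rfl⟩ : ∃ j : Nat, k = j + 1 := ⟨k - 1, by omega⟩
        have hp : (0:Int) < 2 ^ j := pow_pos (by norm_num) _
        have hke : bit = 2 * 2 ^ j := by rw [hk, pow_succ]; ring
        have hnext : PySem.Int.floordiv bit 2 = 2 ^ j := by
          rw [hbit', hke]; omega
        rw [hnext]
        exact ih (2 ^ j) tamanho (by omega)
          (Or.inr ⟨j, rfl⟩) h0 hle (by omega) (by omega)
    · -- bit < 1: finished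
      exact (hz (by omega)).symm

-- ===== VERDICT (by name: the statement is the Claim_ definition above) =====
theorem max_fatia_tamanho_spec : Claim_equal_max_fatia_tamanho := by
  intro N K xs _ hpre
  obtain ⟨hne, hK, hpos⟩ := hpre
  unfold Spec_max_fatia_tamanho max_fatia_tamanho max_fatia_tamanho_alt
  have hmb : maiorBoloB xs K = maiorBoloA xs K := rfl
  rw [hmb]
  rcases (show 1 ≤ maiorBoloA xs K ∨ maiorBoloA xs K < 1 by omega) with hM | hM
  · have hA : buscaA N K xs ((maiorBoloA xs K).toNat + 1) 1 (maiorBoloA xs K) 0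
        = tFeas N K xs (maiorBoloA xs K) :=
      buscaA_eq N K xs (maiorBoloA xs K) hK hpos ((maiorBoloA xs K).toNat + 1)
        1 (maiorBoloA xs K) 0 (by omega)
        le_rfl le_rfl (tFeas_le N K xs _ (by omega)) le_rfl
        (tFeas_nonneg N K xs _) (by have := tFeas_nonneg N K xs (maiorBoloA xs K); omega)
    obtain ⟨hr1, hr2, hr3⟩ := sobeBit_spec (maiorBoloA xs K) ((maiorBoloA xs K).toNat + 1)
      1 (by omega) le_rfl
    obtain ⟨j, hj⟩ := hr3 0 (by norm_num)
    have hB : desceBitB N K xs (maiorBoloA xs K)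
        ((sobeBitB (maiorBoloA xs K) ((maiorBoloA xs K).toNat + 1) 1).toNat + 1)
        0 (sobeBitB (maiorBoloA xs K) ((maiorBoloA xs K).toNat + 1) 1)
        = tFeas N K xs (maiorBoloA xs K) := by
      refine desceBit_aux N K xs (maiorBoloA xs K) hK hpos _ _ 0 (by omega) (Or.inr ⟨j, hj⟩)
        le_rfl (tFeas_nonneg N K xs _) ?_ (by omega)
      intro _
      have htle := tFeas_le N K xs (maiorBoloA xs K) (by omega)
      omega
    rw [hA, hB]
  · have hA : buscaA N K xs ((maiorBoloA xs K).toNat + 1) 1 (maiorBoloA xs K) 0 = 0 := by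
      simp only [buscaA]
      rw [if_neg (show ¬ (1:Int) ≤ maiorBoloA xs K by omega)]
    have hs : sobeBitB (maiorBoloA xs K) ((maiorBoloA xs K).toNat + 1) 1 = 1 := by
      simp only [sobeBitB]
      rw [if_neg (show ¬ (1:Int) * 2 ≤ maiorBoloA xs K by omega)]
    have ht0 : tFeas N K xs (maiorBoloA xs K) = 0 := by
      rcases (show maiorBoloA xs K < 0 ∨ 0 ≤ maiorBoloA xs K by omega) with h | h
      · exact tFeas_of_neg N K xs _ h
      · have h1 := tFeas_le N K xs (maiorBoloA xs K) h
        have h2 := tFeas_nonneg N K xs (maiorBoloA xs K)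
        omega
    rw [hs]
    have hB : desceBitB N K xs (maiorBoloA xs K) ((1:Int).toNat + 1) 0 1
        = tFeas N K xs (maiorBoloA xs K) := by
      refine desceBit_aux N K xs (maiorBoloA xs K) hK hpos _ 1 0 (by omega)
        (Or.inr ⟨0, by norm_num⟩)
        le_rfl (tFeas_nonneg N K xs _) (by rw [ht0]; omega) (by omega)
    rw [hA, hB, ht0]
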